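-- pv_equiv track=rewrite | github.com/GuanceCloud/dataflux-func | worker/utils/toolkit.py | delta_of_delta_encode
-- ===== SOURCE A (Python) =====
-- def delta_of_delta_encode(data):
--     def delta_encde(_data):
--         encoded = []
--         prev = None
--         for i, d in enumerate(_data):
--             if i == 0:
--                 encoded.append(d)
--             else:
--                 encoded.append(d - prev)
--
--             prev = d
--
--         return encoded
--
--     return delta_encde(delta_encde(data))
-- ===== SOURCE B (Python) =====
-- def delta_of_delta_encode(data):
--     out = []
--     p1 = 0
--     p2 = 0
--     for i, d in enumerate(data):
--         if i == 0:
--             out.append(d)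
--         elif i == 1:
--             out.append(d - 2 * p1)
--         else:
--             out.append(d - 2 * p1 + p2)
--         p2 = p1
--         p1 = d
--     return out
-- ===== Notes on version B (the rewrite author's own statement) =====
-- stated objective: alternative
-- what changed: Single pass emitting the second-order differences directly (tracking the last two values) instead of composing two delta-encoding passes with an intermediate list.
import Mathlib
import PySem

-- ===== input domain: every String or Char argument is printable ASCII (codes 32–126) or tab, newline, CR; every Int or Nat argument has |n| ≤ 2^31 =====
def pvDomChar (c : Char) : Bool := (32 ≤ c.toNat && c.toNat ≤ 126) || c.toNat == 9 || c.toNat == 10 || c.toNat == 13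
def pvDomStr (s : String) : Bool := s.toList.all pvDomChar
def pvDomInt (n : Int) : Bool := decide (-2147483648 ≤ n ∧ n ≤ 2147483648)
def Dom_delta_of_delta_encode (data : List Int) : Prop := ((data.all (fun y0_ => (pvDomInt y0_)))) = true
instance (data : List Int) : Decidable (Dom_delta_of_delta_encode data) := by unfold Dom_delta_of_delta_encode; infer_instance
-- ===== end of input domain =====

-- B replaces A's two delta-encoding passes (with an intermediate list) by one pass that
-- emits the second-order differences directly while tracking the last two values.

-- ===== PORT A =====
-- inner helper delta_encde: loop over enumerate with state (encoded, prev)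
def pyDeltaEncde (l : List Int) : List Int :=
  ((PySem.List.enumerate l 0).foldl
    (fun (st : List Int × Option Int) p =>
      (if p.1 == 0 then st.1 ++ [p.2] else st.1 ++ [p.2 - st.2.getD 0], some p.2))
    ([], none)).1

def delta_of_delta_encode (data : List Int) : List Int :=
  pyDeltaEncde (pyDeltaEncde data)

-- ===== PORT B =====
-- single loop over enumerate with state (out, p1, p2)
def delta_of_delta_encode_alt (data : List Int) : List Int :=
  ((PySem.List.enumerate data 0).foldl
    (fun (st : List Int × Int × Int) p =>
      (if p.1 == 0 then st.1 ++ [p.2]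
       else if p.1 == 1 then st.1 ++ [p.2 - 2 * st.2.1]
       else st.1 ++ [p.2 - 2 * st.2.1 + st.2.2], p.2, st.2.1))
    ([], 0, 0)).1

-- ===== PRECONDITION & SPEC =====
def Spec_delta_of_delta_encode (data : List Int) (out : List Int) : Prop := out = delta_of_delta_encode_alt data
instance (data : List Int) (out : List Int) : Decidable (Spec_delta_of_delta_encode data out) := by unfold Spec_delta_of_delta_encode; infer_instance

-- ===== CLAIM (what is proved, stated in full; the proofs are below) =====
def Claim_equal_delta_of_delta_encode : Prop := ∀ (data : List Int), Dom_delta_of_delta_encode data → Spec_delta_of_delta_encode data (delta_of_delta_encode data)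

-- ===== LEMMAS AND PROOFS =====

-- tail of a single delta-encoding pass, given the previous value
def dTail (prev : Int) : List Int → List Int
  | [] => []
  | d :: t => (d - prev) :: dTail d t

def dEnc : List Int → List Int
  | [] => []
  | a :: t => a :: dTail a t

-- tail of the fused second-order pass, given the previous two values
def go2 (p2 p1 : Int) : List Int → List Int
  | [] => []
  | d :: t => (d - 2 * p1 + p2) :: go2 p1 d t

theorem foldlA_tail (t : List Int) : ∀ (s : Int), 1 ≤ s → ∀ (acc : List Int) (prev : Int),
    (((PySem.List.enumerate t s).foldl
      (fun (st : List Int × Option Int) p =>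
        (if p.1 == 0 then st.1 ++ [p.2] else st.1 ++ [p.2 - st.2.getD 0], some p.2))
      (acc, some prev))).1 = acc ++ dTail prev t := by
  induction t with
  | nil => intro s hs acc prev; simp [PySem.List.enumerate_nil, dTail]
  | cons d t ih =>
    intro s hs acc prev
    have h0 : (s == 0) = false := by simp; omega
    rw [PySem.List.enumerate_cons]
    simp only [List.foldl_cons, h0, Bool.false_eq_true, if_false, Option.getD_some]
    rw [ih (s + 1) (by omega)]
    simp [dTail]

theorem pyDeltaEncde_eq (l : List Int) : pyDeltaEncde l = dEnc l := by
  cases l with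
  | nil => simp [pyDeltaEncde, dEnc, PySem.List.enumerate_nil]
  | cons a t =>
    unfold pyDeltaEncde
    rw [PySem.List.enumerate_cons]
    simp only [List.foldl_cons, show ((0:Int) == 0) = true from rfl, if_true,
      show (0:Int)+1 = 1 from rfl, List.nil_append]
    rw [foldlA_tail t 1 (by omega)]
    simp [dEnc]

theorem dTail_dTail (t : List Int) : ∀ (p2 p1 : Int),
    dTail (p1 - p2) (dTail p1 t) = go2 p2 p1 t := by
  induction t with
  | nil => intro p2 p1; simp [dTail, go2]
  | cons d t ih =>
    intro p2 p1
    simp only [dTail, go2]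
    rw [show d - p1 - (p1 - p2) = d - 2 * p1 + p2 by ring, ih p1 d]

theorem foldlB_tail (t : List Int) : ∀ (s : Int), 2 ≤ s → ∀ (acc : List Int) (p1 p2 : Int),
    (((PySem.List.enumerate t s).foldl
      (fun (st : List Int × Int × Int) p =>
        (if p.1 == 0 then st.1 ++ [p.2]
         else if p.1 == 1 then st.1 ++ [p.2 - 2 * st.2.1]
         else st.1 ++ [p.2 - 2 * st.2.1 + st.2.2], p.2, st.2.1))
      (acc, p1, p2))).1 = acc ++ go2 p2 p1 t := by
  induction t with
  | nil => intro s hs acc p1 p2; simp [PySem.List.enumerate_nil, go2]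
  | cons d t ih =>
    intro s hs acc p1 p2
    have h0 : (s == 0) = false := by simp; omega
    have h1 : (s == 1) = false := by simp; omega
    rw [PySem.List.enumerate_cons]
    simp only [List.foldl_cons, h0, h1, Bool.false_eq_true, if_false]
    rw [ih (s + 1) (by omega)]
    simp [go2]

-- ===== VERDICT (by name: the statement is the Claim_ definition above) =====
theorem delta_of_delta_encode_spec : Claim_equal_delta_of_delta_encode := by
  intro data _
  show delta_of_delta_encode data = delta_of_delta_encode_alt data
  rw [delta_of_delta_encode, pyDeltaEncde_eq, pyDeltaEncde_eq]
  cases data with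
  | nil => simp [dEnc, delta_of_delta_encode_alt, PySem.List.enumerate_nil]
  | cons a t =>
    cases t with
    | nil =>
      simp [dEnc, dTail, delta_of_delta_encode_alt, PySem.List.enumerate_nil,
        PySem.List.enumerate_cons]
    | cons b t =>
      unfold delta_of_delta_encode_alt
      rw [PySem.List.enumerate_cons, PySem.List.enumerate_cons]
      simp only [List.foldl_cons, show ((0:Int) == 0) = true from rfl,
        show ((1:Int) == 0) = false from rfl, show ((1:Int) == 1) = true from rfl,
        show (0:Int)+1 = 1 from rfl, show (1:Int)+1 = 2 from rfl,
        if_true, List.nil_append]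
      rw [foldlB_tail t 2 (by omega)]
      have hcomp : dTail (b - a) (dTail b t) = go2 a b t := by
        have := dTail_dTail t a b
        simpa using this
      simp only [dEnc, dTail, hcomp]
      rw [show b - a - a = b - 2 * a by ring]
      simp
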